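-- pv_equiv track=rewrite | github.com/sohmb01/Leetcode-Solutions | solutions/MEDIUM/2503.longest-subarray-with-maximum-bitwise-and.py | longestSubarray
-- ===== SOURCE A (Python) =====
-- from typing import List
--
-- def longestSubarray(nums: List[int]) -> int:
--     def getSubarrayLength(i):
--         if i in visit:
--             return 0
--         l,r = i,i
--         while l>0 and nums[l-1]&nums[i] == nums[i]:
--             visit.add(l)
--             l-=1
--         while r<len(nums)-1 and nums[r+1]&nums[i] == nums[i]:
--             visit.add(r)
--             r+=1
--
--         return r-l+1
--
--     mx = max(nums)
--     indices = []
--     for i,num in enumerate(nums):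
--         if num == mx:
--             indices.append(i)
--     visit = set()
--     mxLen = 1
--     for idx in indices:
--         mxLen = max(mxLen, getSubarrayLength(idx))
--     return mxLen
-- ===== SOURCE B (Python) =====
-- from typing import List
--
-- def longestSubarray(nums: List[int]) -> int:
--     # One flat pass: count consecutive elements whose AND with mx keeps mx's bits,
--     # keep the best run length among runs that actually contain mx.
--     mx = max(nums)
--     best = 1
--     cnt = 0
--     seen = False
--     for x in nums:
--         if x & mx == mx:
--             cnt += 1
--             if x == mx:
--                 seen = True
--         else:
--             if seen:
--                 best = max(best, cnt)
--             cnt = 0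
--             seen = False
--     if seen:
--         best = max(best, cnt)
--     return best
-- ===== Notes on version B (the rewrite author's own statement) =====
-- stated objective: simpler
-- what changed: Replaced A's index-list + visited-set run expansion (two inner while loops per max-occurrence) by a single flat left-to-right pass that counts consecutive elements x with x & mx == mx and keeps the best run length among runs containing mx.
import Mathlib
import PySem

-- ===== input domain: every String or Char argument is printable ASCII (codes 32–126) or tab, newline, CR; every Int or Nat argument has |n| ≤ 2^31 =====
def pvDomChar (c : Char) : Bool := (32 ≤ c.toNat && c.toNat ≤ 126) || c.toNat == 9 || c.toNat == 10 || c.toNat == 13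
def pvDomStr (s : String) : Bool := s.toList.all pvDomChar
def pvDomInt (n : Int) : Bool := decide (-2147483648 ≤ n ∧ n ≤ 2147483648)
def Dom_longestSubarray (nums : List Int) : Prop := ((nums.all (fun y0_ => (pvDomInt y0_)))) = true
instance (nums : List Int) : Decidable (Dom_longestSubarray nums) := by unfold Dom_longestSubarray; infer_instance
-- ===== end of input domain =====

-- B replaces A's index-list + visited-set bidirectional run expansion by one flat counting pass; same values, simpler code.


-- ===== PORT A =====
-- while l>0 and nums[l-1] & nums[i] == nums[i]: visit.add(l); l -= 1   (cur = nums[i]; indices stay in range, so getD is exact)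
def pvLScanA (nums : List Int) (cur : Int) (l : Nat) (visit : PySem.Set Nat) : Nat × PySem.Set Nat :=
  if h : 0 < l ∧ PySem.Int.band (nums.getD (l - 1) 0) cur = cur then
    pvLScanA nums cur (l - 1) (PySem.Set.add visit l)
  else (l, visit)
termination_by l
decreasing_by omega

-- while r<len(nums)-1 and nums[r+1] & nums[i] == nums[i]: visit.add(r); r += 1
def pvRScanA (nums : List Int) (cur : Int) (r : Nat) (visit : PySem.Set Nat) : Nat × PySem.Set Nat :=
  if h : r < nums.length - 1 ∧ PySem.Int.band (nums.getD (r + 1) 0) cur = cur then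
    pvRScanA nums cur (r + 1) (PySem.Set.add visit r)
  else (r, visit)
termination_by nums.length - r
decreasing_by omega

-- def getSubarrayLength(i): ...  (visit passed and returned explicitly)
def pvGetSubLenA (nums : List Int) (visit : PySem.Set Nat) (i : Nat) : Nat × PySem.Set Nat :=
  if PySem.Set.contains visit i then (0, visit)
  else
    let cur := nums.getD i 0
    let lv := pvLScanA nums cur i visit
    let rv := pvRScanA nums cur i lv.2
    (rv.1 - lv.1 + 1, rv.2)

def longestSubarray (nums : List Int) : Int :=
  match PySem.List.max? nums (fun x => x) with
  | none => 0  -- Python: max([]) raises ValueError; excluded by Pre_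
  | some mx =>
    let indices : List Nat :=
      nums.zipIdx.foldl (fun acc p => if p.1 = mx then acc ++ [p.2] else acc) []
    let res := indices.foldl
      (fun (st : Nat × PySem.Set Nat) idx =>
        let lv := pvGetSubLenA nums st.2 idx
        (max st.1 lv.1, lv.2)) (1, PySem.Set.empty)
    (res.1 : Int)

-- ===== PORT B =====
def longestSubarray_alt (nums : List Int) : Int :=
  match PySem.List.max? nums (fun x => x) with
  | none => 0  -- Python: max([]) raises ValueError; excluded by Pre_
  | some mx =>
    let st := nums.foldl
      (fun (st : Nat × Bool × Nat) x =>
        if PySem.Int.band x mx = mx then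
          (st.1 + 1, (if x = mx then true else st.2.1), st.2.2)
        else
          (0, false, if st.2.1 then max st.2.2 st.1 else st.2.2)) (0, false, 1)
    ((if st.2.1 then max st.2.2 st.1 else st.2.2 : Nat) : Int)

-- ===== PRECONDITION & SPEC =====
-- Pre_ excludes only the empty list, on which Python's max(nums) raises ValueError (in A and in B alike).
def Pre_longestSubarray (nums : List Int) : Prop := nums ≠ []
instance (nums : List Int) : Decidable (Pre_longestSubarray nums) := by unfold Pre_longestSubarray; infer_instance
def pvWitness_longestSubarray : List Int := [1, 2, 3, 3, 2]

def Spec_longestSubarray (nums : List Int) (out : Int) : Prop := out = longestSubarray_alt nums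
instance (nums : List Int) (out : Int) : Decidable (Spec_longestSubarray nums out) := by unfold Spec_longestSubarray; infer_instance

-- ===== CLAIM (what is proved, stated in full; the proofs are below) =====
def Claim_equal_longestSubarray : Prop := ∀ (nums : List Int), Dom_longestSubarray nums → Pre_longestSubarray nums → Spec_longestSubarray nums (longestSubarray nums)

-- ===== LEMMAS AND PROOFS =====

-- P nums mx j: position j survives the AND-with-mx test
abbrev pvP (nums : List Int) (mx : Int) (j : Nat) : Prop :=
  PySem.Int.band (nums.getD j 0) mx = mx

-- left end of the P-run at l (same recursion as pvLScanA, without the visit set)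
def pvLend (nums : List Int) (mx : Int) (l : Nat) : Nat :=
  if 0 < l ∧ pvP nums mx (l - 1) then pvLend nums mx (l - 1) else l
termination_by l
decreasing_by omega

-- right end of the P-run at r
def pvRend (nums : List Int) (mx : Int) (r : Nat) : Nat :=
  if r < nums.length - 1 ∧ pvP nums mx (r + 1) then pvRend nums mx (r + 1) else r
termination_by nums.length - r
decreasing_by omega

def pvRunLen (nums : List Int) (mx : Int) (i : Nat) : Nat :=
  pvRend nums mx i - pvLend nums mx i + 1

-- mx-indices below m
def pvIds (nums : List Int) (mx : Int) (m : Nat) : List Nat :=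
  (List.range m).filter (fun i => nums.getD i 0 = mx)

-- running max of run lengths
def pvF (nums : List Int) (mx : Int) (init : Nat) (s : List Nat) : Nat :=
  s.foldl (fun a j => max a (pvRunLen nums mx j)) init

theorem pvLend_le (nums : List Int) (mx : Int) (l : Nat) : pvLend nums mx l ≤ l := by
  fun_induction pvLend nums mx l with
  | case1 l h ih => omega
  | case2 l h => omega

theorem pvLend_P (nums : List Int) (mx : Int) (l k : Nat)
    (h1 : pvLend nums mx l ≤ k) (h2 : k < l) : pvP nums mx k := by
  induction l using Nat.strong_induction_on with
  | _ l ih =>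
    rw [pvLend] at h1
    by_cases hc : 0 < l ∧ pvP nums mx (l - 1)
    · rw [if_pos hc] at h1
      rcases Nat.lt_or_ge k (l - 1) with h | h
      · exact ih (l - 1) (by omega) h1 h
      · have : k = l - 1 := by omega
        subst this; exact hc.2
    · rw [if_neg hc] at h1; omega

theorem pvRend_ge (nums : List Int) (mx : Int) (r : Nat) : r ≤ pvRend nums mx r := by
  fun_induction pvRend nums mx r with
  | case1 r h ih => omega
  | case2 r h => omega

theorem pvRend_le (nums : List Int) (mx : Int) (r : Nat) (h : r ≤ nums.length - 1) :
    pvRend nums mx r ≤ nums.length - 1 := by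
  revert h
  fun_induction pvRend nums mx r with
  | case1 r h ih => intro _; exact ih (by omega)
  | case2 r h => intro h'; omega

theorem pvRend_P (nums : List Int) (mx : Int) (r k : Nat)
    (h1 : r < k) (h2 : k ≤ pvRend nums mx r) : pvP nums mx k := by
  revert h1 h2
  fun_induction pvRend nums mx r with
  | case1 r h ih =>
    intro h1 h2
    rcases Nat.lt_or_ge (r + 1) k with hlt | hge
    · exact ih hlt h2
    · have : k = r + 1 := by omega
      subst this; exact h.2
  | case2 r h => intro h1 h2; omega

-- if P holds on [i, j), the left ends agree
theorem pvLend_interval (nums : List Int) (mx : Int) (i j : Nat) (hij : i ≤ j)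
    (hP : ∀ k, i ≤ k → k < j → pvP nums mx k) : pvLend nums mx j = pvLend nums mx i := by
  induction j using Nat.strong_induction_on with
  | _ j ih =>
    rcases Nat.eq_or_lt_of_le hij with he | hlt
    · rw [he]
    · have hP' : pvP nums mx (j - 1) := hP (j - 1) (by omega) (by omega)
      conv_lhs => rw [pvLend]
      rw [if_pos ⟨by omega, hP'⟩]
      exact ih (j - 1) (by omega) (by omega) (fun k hk1 hk2 => hP k hk1 (by omega))

-- if P holds on (i, j], the right ends agree
theorem pvRend_interval (nums : List Int) (mx : Int) (i j : Nat) (hij : i ≤ j)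
    (hj : j ≤ nums.length - 1)
    (hP : ∀ k, i < k → k ≤ j → pvP nums mx k) : pvRend nums mx i = pvRend nums mx j := by
  induction hd : j - i using Nat.strong_induction_on generalizing i with
  | _ d ih =>
    rcases Nat.eq_or_lt_of_le hij with he | hlt
    · rw [he]
    · have hP1 : pvP nums mx (i + 1) := hP (i + 1) (by omega) (by omega)
      conv_lhs => rw [pvRend]
      rw [if_pos ⟨by omega, hP1⟩]
      exact ih (j - (i + 1)) (by omega) (i + 1) (by omega)
        (fun k hk1 hk2 => hP k (by omega) hk2) rfl

-- two P-positions in one run have the same run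
theorem pvRun_eq (nums : List Int) (mx : Int) (i j : Nat)
    (_hi : pvP nums mx i) (hj : pvP nums mx j) (hjn : j ≤ nums.length - 1)
    (h1 : pvLend nums mx j ≤ i) (h2 : i ≤ pvRend nums mx j) :
    pvLend nums mx i = pvLend nums mx j ∧ pvRend nums mx i = pvRend nums mx j := by
  rcases Nat.le_total i j with hij | hji
  · constructor
    · exact (pvLend_interval nums mx i j hij
        (fun k hk1 hk2 => pvLend_P nums mx j k (by omega) hk2)).symm
    · exact (pvRend_interval nums mx i j hij hjn (fun k hk1 hk2 => by
        rcases Nat.eq_or_lt_of_le hk2 with he | hlt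
        · rw [he]; exact hj
        · exact pvLend_P nums mx j k (by omega) hlt))
  · have hin : i ≤ nums.length - 1 := le_trans h2 (pvRend_le nums mx j hjn)
    constructor
    · exact pvLend_interval nums mx j i hji (fun k hk1 hk2 => by
        rcases Nat.eq_or_lt_of_le hk1 with he | hlt
        · rw [← he]; exact hj
        · exact pvRend_P nums mx j k hlt (by omega))
    · exact (pvRend_interval nums mx j i hji hin
        (fun k hk1 hk2 => pvRend_P nums mx j k hk1 (by omega))).symm

theorem pvLScanA_fst (nums : List Int) (cur : Int) (l : Nat) (v : PySem.Set Nat) :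
    (pvLScanA nums cur l v).1 = pvLend nums cur l := by
  fun_induction pvLScanA nums cur l v with
  | case1 l v h ih =>
    rw [ih]
    conv_rhs => rw [pvLend]
    rw [if_pos h]
  | case2 l v h =>
    conv_rhs => rw [pvLend]
    rw [if_neg h]

theorem pvLScanA_snd (nums : List Int) (cur : Int) (l : Nat) (v : PySem.Set Nat) (x : Nat) :
    x ∈ (pvLScanA nums cur l v).2 ↔ x ∈ v ∨ (pvLend nums cur l < x ∧ x ≤ l) := by
  fun_induction pvLScanA nums cur l v with
  | case1 l v h ih =>
    rw [ih, PySem.Set.mem_add]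
    have hle : pvLend nums cur (l - 1) ≤ l - 1 := pvLend_le nums cur (l - 1)
    have heq : pvLend nums cur l = pvLend nums cur (l - 1) := by
      conv_lhs => rw [pvLend]
      rw [if_pos h]
    rw [heq]
    constructor
    · rintro ((hx | hx) | hx)
      · exact Or.inl hx
      · exact Or.inr (by omega)
      · exact Or.inr (by omega)
    · rintro (hx | hx)
      · exact Or.inl (Or.inl hx)
      · rcases Nat.lt_or_ge (l - 1) x with hc | hc
        · exact Or.inl (Or.inr (by omega))
        · exact Or.inr (by omega)
  | case2 l v h =>
    have : pvLend nums cur l = l := by rw [pvLend, if_neg h]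
    rw [this]
    constructor
    · intro hx; exact Or.inl hx
    · rintro (hx | hx)
      · exact hx
      · omega

theorem pvRScanA_fst (nums : List Int) (cur : Int) (r : Nat) (v : PySem.Set Nat) :
    (pvRScanA nums cur r v).1 = pvRend nums cur r := by
  fun_induction pvRScanA nums cur r v with
  | case1 r v h ih =>
    rw [ih]
    conv_rhs => rw [pvRend]
    rw [if_pos h]
  | case2 r v h =>
    conv_rhs => rw [pvRend]
    rw [if_neg h]

theorem pvRScanA_snd (nums : List Int) (cur : Int) (r : Nat) (v : PySem.Set Nat) (x : Nat) :
    x ∈ (pvRScanA nums cur r v).2 ↔ x ∈ v ∨ (r ≤ x ∧ x < pvRend nums cur r) := by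
  fun_induction pvRScanA nums cur r v with
  | case1 r v h ih =>
    rw [ih, PySem.Set.mem_add]
    have hge : r + 1 ≤ pvRend nums cur (r + 1) := pvRend_ge nums cur (r + 1)
    have heq : pvRend nums cur r = pvRend nums cur (r + 1) := by
      conv_lhs => rw [pvRend]
      rw [if_pos h]
    rw [heq]
    constructor
    · rintro ((hx | hx) | hx)
      · exact Or.inl hx
      · exact Or.inr (by omega)
      · exact Or.inr (by omega)
    · rintro (hx | hx)
      · exact Or.inl (Or.inl hx)
      · rcases Nat.lt_or_ge x (r + 1) with hc | hc
        · exact Or.inl (Or.inr (by omega))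
        · exact Or.inr (by omega)
  | case2 r v h =>
    have : pvRend nums cur r = r := by rw [pvRend, if_neg h]
    rw [this]
    constructor
    · intro hx; exact Or.inl hx
    · rintro (hx | hx)
      · exact hx
      · omega

theorem pvF_append (nums : List Int) (mx : Int) (init : Nat) (s t : List Nat) :
    pvF nums mx init (s ++ t) = pvF nums mx (pvF nums mx init s) t := by
  simp [pvF, List.foldl_append]

theorem pvF_single (nums : List Int) (mx : Int) (init : Nat) (i : Nat) :
    pvF nums mx init [i] = max init (pvRunLen nums mx i) := by
  simp [pvF]

theorem le_pvF (nums : List Int) (mx : Int) (init : Nat) (s : List Nat) :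
    init ≤ pvF nums mx init s := by
  exact (PySem.List.le_foldl_max_nat s (pvRunLen nums mx) init).1

theorem mem_le_pvF (nums : List Int) (mx : Int) (init : Nat) (s : List Nat) (j : Nat)
    (h : j ∈ s) : pvRunLen nums mx j ≤ pvF nums mx init s := by
  exact (PySem.List.le_foldl_max_nat s (pvRunLen nums mx) init).2 j h

theorem pvF_const (nums : List Int) (mx : Int) (init c : Nat) (s : List Nat)
    (h : ∀ j ∈ s, pvRunLen nums mx j = c) :
    pvF nums mx init s = if s = [] then init else max init c := by
  induction s generalizing init with
  | nil => simp [pvF]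
  | cons j t ih =>
    have hj : pvRunLen nums mx j = c := h j (List.mem_cons_self ..)
    have hstep : pvF nums mx init (j :: t) = pvF nums mx (max init c) t := by
      simp [pvF, hj]
    rw [hstep, ih (max init c) (fun x hx => h x (List.mem_cons_of_mem _ hx))]
    rcases t with _ | ⟨y, t'⟩
    · simp
    · simp only [List.cons_ne_nil, reduceIte]
      omega

-- A's indices list is the filtered range
theorem pvFoldIdx_acc (mx : Int) (ps : List (Int × Nat)) (acc : List Nat) :
    ps.foldl (fun acc p => if p.1 = mx then acc ++ [p.2] else acc) acc =
      acc ++ ps.foldl (fun acc p => if p.1 = mx then acc ++ [p.2] else acc) [] := by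
  induction ps generalizing acc with
  | nil => simp
  | cons p t ih =>
    simp only [List.foldl_cons]
    by_cases hp : p.1 = mx
    · simp only [if_pos hp, List.nil_append]
      rw [ih (acc ++ [p.2]), ih [p.2], List.append_assoc]
    · rw [if_neg hp, if_neg hp, ih acc]

theorem pvIndices_eq (nums : List Int) (mx : Int) :
    nums.zipIdx.foldl (fun acc p => if p.1 = mx then acc ++ [p.2] else acc) [] =
      pvIds nums mx nums.length := by
  induction nums using List.reverseRecOn with
  | nil => rfl
  | append_singleton xs x ih =>
    rw [List.zipIdx_append, List.foldl_append, pvFoldIdx_acc]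
    rw [ih]
    have hrange : List.range (xs ++ [x]).length = List.range xs.length ++ [xs.length] := by
      simp [List.range_succ]
    have hsame : pvIds (xs ++ [x]) mx xs.length = pvIds xs mx xs.length := by
      unfold pvIds
      apply List.filter_congr
      intro i hi
      have hi' : i < xs.length := List.mem_range.mp hi
      simp [List.getD_eq_getElem?_getD, List.getElem?_append_left hi']
    have hlast : (xs ++ [x]).getD xs.length 0 = x := by
      simp [List.getD_eq_getElem?_getD]
    unfold pvIds
    rw [hrange, List.filter_append]
    unfold pvIds at hsame ih
    rw [← hsame]
    congr 1
    simp only [List.filter, hlast, List.zipIdx_singleton]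
    by_cases hx : x = mx
    · simp [hx]
    · simp [hx]

theorem pvIds_mem (nums : List Int) (mx : Int) (m j : Nat) :
    j ∈ pvIds nums mx m ↔ j < m ∧ nums.getD j 0 = mx := by
  simp [pvIds, List.mem_filter, List.mem_range]

theorem pvIds_succ (nums : List Int) (mx : Int) (k : Nat) :
    pvIds nums mx (k + 1) = pvIds nums mx k ++ (if nums.getD k 0 = mx then [k] else []) := by
  unfold pvIds
  rw [List.range_succ, List.filter_append]
  congr 1
  by_cases hx : nums.getD k 0 = mx
  · have hx' : nums[k]?.getD 0 = mx := hx
    simp [hx']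
  · have hx' : ¬ nums[k]?.getD 0 = mx := hx
    simp [hx']

theorem pvIds_split (nums : List Int) (mx : Int) (a b : Nat) (h : a ≤ b) :
    pvIds nums mx b = pvIds nums mx a ++ ((List.range b).filter (fun i => a ≤ i ∧ nums.getD i 0 = mx)) := by
  induction b with
  | zero =>
    have : a = 0 := by omega
    subst this
    simp [pvIds]
  | succ b ihb =>
    rcases Nat.lt_or_ge b a with hb | hb
    · have hab : a = b + 1 := by omega
      subst hab
      have : (List.range (b + 1)).filter (fun i => b + 1 ≤ i ∧ nums.getD i 0 = mx) = [] := by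
        apply List.filter_eq_nil_iff.mpr
        intro i hi
        have := List.mem_range.mp hi
        simp only [decide_eq_true_eq, not_and]
        omega
      rw [this, List.append_nil]
    · rw [pvIds_succ, ihb hb, List.range_succ, List.filter_append, List.append_assoc]
      congr 1
      by_cases hx : nums.getD b 0 = mx
      · have hx' : nums[b]?.getD 0 = mx := hx
        simp [hx', hb]
      · have hx' : ¬ nums[b]?.getD 0 = mx := hx
        simp [hx']

-- ===== A-side: the fold over indices computes pvF =====
theorem pvA_fold (nums : List Int) (mx : Int) (ids : List Nat) :
    ∀ (proc : List Nat) (v : PySem.Set Nat),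
    (∀ j ∈ ids, nums.getD j 0 = mx ∧ j < nums.length) →
    (∀ j ∈ proc, nums.getD j 0 = mx ∧ j < nums.length) →
    (∀ x ∈ v, ∃ j ∈ proc, pvLend nums mx j ≤ x ∧ x ≤ pvRend nums mx j) →
    (ids.foldl (fun (st : Nat × PySem.Set Nat) idx =>
        let lv := pvGetSubLenA nums st.2 idx
        (max st.1 lv.1, lv.2)) (pvF nums mx 1 proc, v)).1 = pvF nums mx 1 (proc ++ ids) := by
  induction ids with
  | nil => intro proc v _ _ _; simp
  | cons i rest ih =>
    intro proc v hids hproc hv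
    have hi : nums.getD i 0 = mx ∧ i < nums.length :=
      hids i (List.mem_cons_self ..)
    have hPi : pvP nums mx i := by
      unfold pvP; rw [hi.1]; exact PySem.Int.band_self mx
    have hproc' : ∀ j ∈ proc ++ [i], nums.getD j 0 = mx ∧ j < nums.length := by
      intro j hj
      rcases List.mem_append.mp hj with h | h
      · exact hproc j h
      · rw [List.mem_singleton.mp h]; exact hi
    have hassoc : proc ++ i :: rest = (proc ++ [i]) ++ rest := by simp
    simp only [List.foldl_cons]
    by_cases hmem : PySem.Set.contains v i = true
    · -- i already visited: contributes 0, and its run length is already counted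
      have hmem' : i ∈ v := by
        simpa [PySem.Set.contains] using hmem
      obtain ⟨j, hjp, hj1, hj2⟩ := hv i hmem'
      have hjm := hproc j hjp
      have hPj : pvP nums mx j := by
        unfold pvP; rw [hjm.1]; exact PySem.Int.band_self mx
      have hrun := pvRun_eq nums mx i j hPi hPj (by omega) hj1 hj2
      have hlen_le : pvRunLen nums mx i ≤ pvF nums mx 1 proc := by
        have : pvRunLen nums mx i = pvRunLen nums mx j := by
          unfold pvRunLen; rw [hrun.1, hrun.2]
        rw [this]
        exact mem_le_pvF nums mx 1 proc j hjp
      have hF : pvF nums mx 1 (proc ++ [i]) = pvF nums mx 1 proc := by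
        rw [pvF_append, pvF_single]
        have h1 : 1 ≤ pvF nums mx 1 proc := le_pvF nums mx 1 proc
        omega
      have hstate : (max (pvF nums mx 1 proc) (pvGetSubLenA nums v i).1,
          (pvGetSubLenA nums v i).2) = (pvF nums mx 1 (proc ++ [i]), v) := by
        unfold pvGetSubLenA
        rw [if_pos hmem]
        simp [hF]
      rw [hassoc, hstate]
      exact ih (proc ++ [i]) v (fun j hj => hids j (List.mem_cons_of_mem _ hj))
        hproc' (fun x hx => by
          obtain ⟨j, hjp, hjle⟩ := hv x hx
          exact ⟨j, List.mem_append.mpr (Or.inl hjp), hjle⟩)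
    · -- fresh index: the two scans compute the run ends, visit grows inside the run
      have hcur : nums.getD i 0 = mx := hi.1
      have hlen : (pvGetSubLenA nums v i).1 = pvRunLen nums mx i := by
        unfold pvGetSubLenA
        rw [if_neg hmem]
        simp only [hcur]
        rw [pvRScanA_fst, pvLScanA_fst]
        rfl
      have hvis : ∀ x ∈ (pvGetSubLenA nums v i).2,
          ∃ j ∈ proc ++ [i], pvLend nums mx j ≤ x ∧ x ≤ pvRend nums mx j := by
        intro x hx
        unfold pvGetSubLenA at hx
        rw [if_neg hmem] at hx
        simp only [hcur] at hx
        rw [pvRScanA_snd] at hx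
        rcases hx with hx | hx
        · rw [pvLScanA_snd] at hx
          rcases hx with hx | hx
          · obtain ⟨j, hjp, hjle⟩ := hv x hx
            exact ⟨j, List.mem_append.mpr (Or.inl hjp), hjle⟩
          · refine ⟨i, List.mem_append.mpr (Or.inr (List.mem_singleton.mpr rfl)), by omega, ?_⟩
            have := pvRend_ge nums mx i
            omega
        · refine ⟨i, List.mem_append.mpr (Or.inr (List.mem_singleton.mpr rfl)), ?_, by omega⟩
          have := pvLend_le nums mx i
          omega
      have hF : max (pvF nums mx 1 proc) (pvRunLen nums mx i) = pvF nums mx 1 (proc ++ [i]) := by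
        rw [pvF_append, pvF_single]
      have hstate2 : (max (pvF nums mx 1 proc) (pvGetSubLenA nums v i).1,
          (pvGetSubLenA nums v i).2) =
          (pvF nums mx 1 (proc ++ [i]), (pvGetSubLenA nums v i).2) := by
        rw [hlen, hF]
      rw [hassoc, hstate2]
      exact ih (proc ++ [i]) (pvGetSubLenA nums v i).2
        (fun j hj => hids j (List.mem_cons_of_mem _ hj)) hproc' hvis

theorem pvLend_idem (nums : List Int) (mx : Int) (k : Nat) :
    pvLend nums mx (pvLend nums mx k) = pvLend nums mx k := by
  exact (pvLend_interval nums mx (pvLend nums mx k) k (pvLend_le nums mx k)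
    (fun j hj1 hj2 => pvLend_P nums mx k j hj1 hj2)).symm

-- closing a run at k (k = n or ¬P k): flushing gives pvF of all ids below k
theorem pvClose (nums : List Int) (mx : Int) (k : Nat) (hk : k ≤ nums.length)
    (hstop : k = nums.length ∨ ¬ pvP nums mx k) :
    (if decide (∃ j < k, pvLend nums mx k ≤ j ∧ nums.getD j 0 = mx) then
        max (pvF nums mx 1 (pvIds nums mx (pvLend nums mx k))) (k - pvLend nums mx k)
      else pvF nums mx 1 (pvIds nums mx (pvLend nums mx k))) =
    pvF nums mx 1 (pvIds nums mx k) := by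
  have hle : pvLend nums mx k ≤ k := pvLend_le nums mx k
  have hsplit := pvIds_split nums mx (pvLend nums mx k) k hle
  set a := pvLend nums mx k with ha
  set mid := (List.range k).filter (fun i => a ≤ i ∧ nums.getD i 0 = mx) with hmid
  have hmem : ∀ j, j ∈ mid ↔ (a ≤ j ∧ j < k ∧ nums.getD j 0 = mx) := by
    intro j
    rw [hmid, List.mem_filter, List.mem_range]
    simp only [decide_eq_true_eq]
    constructor
    · rintro ⟨h1, h2, h3⟩; exact ⟨h2, h1, h3⟩
    · rintro ⟨h1, h2, h3⟩; exact ⟨h2, h1, h3⟩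
  have hconst : ∀ j ∈ mid, pvRunLen nums mx j = k - a := by
    intro j hj
    rw [hmem j] at hj
    obtain ⟨hj1, hj2, hj3⟩ := hj
    have hPj : pvP nums mx j := by
      unfold pvP; rw [hj3]; exact PySem.Int.band_self mx
    have hlendj : pvLend nums mx j = a := by
      rw [pvLend_interval nums mx a j hj1
        (fun i hi1 hi2 => pvLend_P nums mx k i (by rw [← ha]; exact hi1) (by omega))]
      rw [ha]; exact pvLend_idem nums mx k
    have hk1 : k - 1 < k := by omega
    have hrendk1 : pvRend nums mx (k - 1) = k - 1 := by
      rw [pvRend]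
      rcases hstop with hs | hs
      · rw [if_neg]; rintro ⟨h1, -⟩; omega
      · rw [if_neg]; rintro ⟨-, h2⟩
        have : k - 1 + 1 = k := by omega
        rw [this] at h2; exact hs h2
    have hrendj : pvRend nums mx j = k - 1 := by
      rw [pvRend_interval nums mx j (k - 1) (by omega) (by omega)
        (fun i hi1 hi2 => pvLend_P nums mx k i (by omega) (by omega)), hrendk1]
    unfold pvRunLen
    rw [hlendj, hrendj]
    omega
  by_cases hex : ∃ j < k, a ≤ j ∧ nums.getD j 0 = mx
  · obtain ⟨j0, hj0k, hj0a, hj0m⟩ := hex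
    have hmidne : mid ≠ [] := by
      intro hnil
      have := (hmem j0).mpr ⟨hj0a, hj0k, hj0m⟩
      rw [hnil] at this
      exact List.not_mem_nil this
    rw [if_pos (decide_eq_true (show ∃ j < k, a ≤ j ∧ nums.getD j 0 = mx from
      ⟨j0, hj0k, hj0a, hj0m⟩))]
    rw [hsplit, pvF_append, pvF_const nums mx _ (k - a) mid hconst, if_neg hmidne]
  · have hmidnil : mid = [] := by
      rw [hmid]
      apply List.filter_eq_nil_iff.mpr
      intro i hi hdec
      have hik := List.mem_range.mp hi
      simp only [decide_eq_true_eq] at hdec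
      exact hex ⟨i, hik, hdec.1, hdec.2⟩
    rw [if_neg (by simp only [decide_eq_true_eq]; exact hex)]
    rw [hsplit, hmidnil, List.append_nil]

-- ===== B-side: the single pass computes pvF =====
theorem pvB_fold (nums : List Int) (mx : Int) (k : Nat) (hk : k ≤ nums.length) :
    (nums.take k).foldl
      (fun (st : Nat × Bool × Nat) x =>
        if PySem.Int.band x mx = mx then
          (st.1 + 1, (if x = mx then true else st.2.1), st.2.2)
        else
          (0, false, if st.2.1 then max st.2.2 st.1 else st.2.2)) (0, false, 1) =
    (k - pvLend nums mx k,
     decide (∃ j < k, pvLend nums mx k ≤ j ∧ nums.getD j 0 = mx),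
     pvF nums mx 1 (pvIds nums mx (pvLend nums mx k))) := by
  induction k with
  | zero =>
    have hl0 : pvLend nums mx 0 = 0 := by rw [pvLend]; simp
    simp [hl0, pvIds, pvF]
  | succ k ihk =>
    have hkn : k < nums.length := by omega
    have htake : nums.take (k + 1) = nums.take k ++ [nums.getD k 0] := by
      rw [List.take_add_one]
      congr 1
      rw [List.getElem?_eq_getElem hkn]
      simp [List.getD_eq_getElem?_getD, List.getElem?_eq_getElem hkn]
    rw [htake, List.foldl_append, ihk (by omega)]
    simp only [List.foldl_cons, List.foldl_nil]
    have hlek : pvLend nums mx k ≤ k := pvLend_le nums mx k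
    by_cases hp : pvP nums mx k
    · rw [if_pos hp]
      have hlend : pvLend nums mx (k + 1) = pvLend nums mx k := by
        conv_lhs => rw [pvLend]
        rw [if_pos ⟨by omega, by simpa using hp⟩]
        norm_num
      rw [hlend]
      refine Prod.ext ?_ (Prod.ext ?_ ?_)
      · simp; omega
      · -- seen component
        simp only
        by_cases hxm : nums.getD k 0 = mx
        · rw [if_pos hxm]
          have hex : ∃ j < k + 1, pvLend nums mx k ≤ j ∧ nums.getD j 0 = mx :=
            ⟨k, by omega, hlek, hxm⟩
          exact (decide_eq_true hex).symm
        · rw [if_neg hxm]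
          have hiff : (∃ j < k, pvLend nums mx k ≤ j ∧ nums.getD j 0 = mx) ↔
              (∃ j < k + 1, pvLend nums mx k ≤ j ∧ nums.getD j 0 = mx) := by
            constructor
            · rintro ⟨j, h1, h2, h3⟩; exact ⟨j, by omega, h2, h3⟩
            · rintro ⟨j, h1, h2, h3⟩
              refine ⟨j, ?_, h2, h3⟩
              rcases Nat.lt_or_ge j k with hc | hc
              · exact hc
              · have : j = k := by omega
                rw [this] at h3; exact absurd h3 hxm
          exact decide_eq_decide.mpr hiff
      · rfl
    · rw [if_neg hp]
      have hlend : pvLend nums mx (k + 1) = k + 1 := by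
        rw [pvLend, if_neg (fun hc => hp (by simpa using hc.2))]
      rw [hlend]
      refine Prod.ext ?_ (Prod.ext ?_ ?_)
      · simp
      · simp only
        have hno : ¬ ∃ j < k + 1, k + 1 ≤ j ∧ nums.getD j 0 = mx := by
          rintro ⟨j, h1, h2, -⟩; omega
        exact (decide_eq_false hno).symm
      · -- best component: flush the finished run
        simp only
        have hids1 : pvIds nums mx (k + 1) = pvIds nums mx k := by
          rw [pvIds_succ, if_neg (fun hc => hp (show pvP nums mx k by unfold pvP; rw [hc]; exact PySem.Int.band_self mx))]
          simp
        rw [hids1]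
        exact pvClose nums mx k (by omega) (Or.inr hp)

theorem pvMain (nums : List Int) :
    longestSubarray nums = longestSubarray_alt nums := by
  unfold longestSubarray longestSubarray_alt
  cases hmx : PySem.List.max? nums (fun x => x) with
  | none => rfl
  | some mx =>
    simp only
    rw [pvIndices_eq nums mx]
    have hinit : ((1 : Nat), (PySem.Set.empty : PySem.Set Nat)) =
        (pvF nums mx 1 [], PySem.Set.empty) := rfl
    rw [hinit]
    have hA := pvA_fold nums mx (pvIds nums mx nums.length) [] PySem.Set.empty
      (fun j hj => by
        have := (pvIds_mem nums mx nums.length j).mp hj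
        exact ⟨this.2, this.1⟩)
      (fun j hj => absurd hj (List.not_mem_nil))
      (fun x hx => absurd hx (List.not_mem_nil))
    rw [hA, List.nil_append]
    have hB := pvB_fold nums mx nums.length le_rfl
    rw [List.take_length] at hB
    rw [hB]
    have hclose := pvClose nums mx nums.length le_rfl (Or.inl rfl)
    rw [hclose]

-- ===== VERDICT (by name: the statement is the Claim_ definition above) =====
theorem longestSubarray_spec : Claim_equal_longestSubarray := by
  intro nums _ _
  unfold Spec_longestSubarray
  exact pvMain nums
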